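-- pv_equiv track=rewrite | github.com/vellankis-space/FlowPilot-AI | backend/scrape_automation_anywhere.py | _map_input
-- ===== SOURCE A (Python) =====
-- from typing import Dict, List, Optional, Tuple
--
-- def _map_input(rows: List[Dict[str, str]]) -> List[Dict[str, str]]:
--     out: List[Dict[str, str]] = []
--     for r in rows:
--         argument = r.get("Name") or r.get("Argument") or r.get("Parameter") or r.get("Col1")
--         ptype = r.get("Type") or r.get("Accepts") or r.get("Col2")
--         description = r.get("Description") or r.get("Col3")
--         item: Dict[str, str] = {}
--         if argument:
--             item["Argument"] = argument
--         if ptype: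
--             item["Type"] = ptype
--         if description:
--             item["Description"] = description
--         if item:
--             out.append(item)
--     return out
-- ===== SOURCE B (Python) =====
-- from typing import Dict, List
--
-- # source key -> (field index, rank): field 0 = Argument, 1 = Type, 2 = Description
-- _PRIO = {
--     "Name": (0, 0), "Argument": (0, 1), "Parameter": (0, 2), "Col1": (0, 3),
--     "Type": (1, 0), "Accepts": (1, 1), "Col2": (1, 2),
--     "Description": (2, 0), "Col3": (2, 1),
-- }
--
-- def _map_input(rows: List[Dict[str, str]]) -> List[Dict[str, str]]:
--     out: List[Dict[str, str]] = []
--     for r in rows: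
--         # one pass over the row's entries: keep the lowest-rank truthy candidate per field
--         best = [None, None, None]
--         for k, v in r.items():
--             spec = _PRIO.get(k)
--             if spec is not None and v:
--                 f, p = spec
--                 if best[f] is None or p < best[f][0]:
--                     best[f] = (p, v)
--         item: Dict[str, str] = {}
--         if best[0]:
--             item["Argument"] = best[0][1]
--         if best[1]:
--             item["Type"] = best[1][1]
--         if best[2]:
--             item["Description"] = best[2][1]
--         if item:
--             out.append(item)
--     return out
-- ===== Notes on version B (the rewrite author's own statement) =====
-- stated objective: alternative
-- what changed: Instead of three per-field first-truthy lookup chains, B makes a single pass over each row's items with a key->(field,rank) priority map and keeps the lowest-rank truthy candidate per field, then emits the three fields in fixed order.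
import Mathlib
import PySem

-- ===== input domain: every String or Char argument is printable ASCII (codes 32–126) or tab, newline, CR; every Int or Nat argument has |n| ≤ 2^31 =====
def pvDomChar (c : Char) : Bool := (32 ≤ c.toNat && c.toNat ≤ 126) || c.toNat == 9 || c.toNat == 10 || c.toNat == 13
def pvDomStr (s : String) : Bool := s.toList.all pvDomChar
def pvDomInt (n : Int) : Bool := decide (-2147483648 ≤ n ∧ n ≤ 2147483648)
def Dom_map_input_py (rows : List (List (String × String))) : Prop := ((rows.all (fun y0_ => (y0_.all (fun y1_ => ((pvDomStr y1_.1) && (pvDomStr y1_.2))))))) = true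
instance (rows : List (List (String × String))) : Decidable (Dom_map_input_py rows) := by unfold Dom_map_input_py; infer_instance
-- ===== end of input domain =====

-- B replaces A's three per-field first-truthy lookup chains by a single pass over each
-- row's items with a key->(field,rank) priority map, keeping the lowest-rank truthy
-- candidate per field (objective: alternative).

-- ===== PORT A =====
-- r.get(k): first match in the association list (Python dict lookup)
def pvGet (r : List (String × String)) (k : String) : Option String :=
  (PySem.Dict.mk r).get? k

-- Python truthiness of an Optional[str]
def pvTruthy (o : Option String) : Bool :=
  match o with
  | some s => !(s == "")
  | none => false

-- Python 'x or y' on Optional[str]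
def pvOr (a b : Option String) : Option String :=
  if pvTruthy a then a else b

def map_input_py (rows : List (List (String × String))) : List (List (String × String)) :=
  rows.foldl (fun out r =>
    let argument := pvOr (pvOr (pvOr (pvGet r "Name") (pvGet r "Argument")) (pvGet r "Parameter")) (pvGet r "Col1")
    let ptype := pvOr (pvOr (pvGet r "Type") (pvGet r "Accepts")) (pvGet r "Col2")
    let description := pvOr (pvGet r "Description") (pvGet r "Col3")
    let item : List (String × String) := []
    let item := if pvTruthy argument then item ++ [("Argument", argument.getD "")] else item
    let item := if pvTruthy ptype then item ++ [("Type", ptype.getD "")] else item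
    let item := if pvTruthy description then item ++ [("Description", description.getD "")] else item
    if item ≠ [] then out ++ [item] else out) []

-- ===== PORT B =====
-- _PRIO.get(k): source key -> (field index, rank)
def pvPrio (k : String) : Option (Nat × Nat) :=
  (PySem.Dict.mk [("Name", ((0:Nat), (0:Nat))), ("Argument", (0, 1)), ("Parameter", (0, 2)), ("Col1", (0, 3)),
    ("Type", (1, 0)), ("Accepts", (1, 1)), ("Col2", (1, 2)),
    ("Description", (2, 0)), ("Col3", (2, 1))]).get? k

-- 'if best[f] is None or p < best[f][0]: best[f] = (p, v)'
def pvUpd (b : Option (Nat × String)) (p : Nat) (v : String) : Option (Nat × String) :=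
  match b with
  | none => some (p, v)
  | some (q, w) => if p < q then some (p, v) else some (q, w)

-- one iteration of B's inner loop over a row entry (k, v)
def pvStep (b : Option (Nat × String) × Option (Nat × String) × Option (Nat × String))
    (kv : String × String) : Option (Nat × String) × Option (Nat × String) × Option (Nat × String) :=
  match pvPrio kv.1 with
  | none => b
  | some (f, p) =>
    if kv.2 ≠ "" then
      if f = 0 then (pvUpd b.1 p kv.2, b.2.1, b.2.2)
      else if f = 1 then (b.1, pvUpd b.2.1 p kv.2, b.2.2)
      else (b.1, b.2.1, pvUpd b.2.2 p kv.2)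
    else b

-- r.items(): the entries of the dict the association list denotes under this file's
-- first-match lookup convention — the first occurrence of each key, in order (exact:
-- a list that represents a Python dict has distinct keys and is returned unchanged)
def pvItemsFM (r : List (String × String)) (seen : List String) : List (String × String) :=
  match r with
  | [] => []
  | (k, v) :: t => if k ∈ seen then pvItemsFM t seen else (k, v) :: pvItemsFM t (k :: seen)

def pvRowItemB (r : List (String × String)) : List (String × String) :=
  let b := (pvItemsFM r []).foldl pvStep (none, none, none)
  let item : List (String × String) := []
  let item := match b.1 with | some pv => item ++ [("Argument", pv.2)] | none => item
  let item := match b.2.1 with | some pv => item ++ [("Type", pv.2)] | none => item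
  match b.2.2 with | some pv => item ++ [("Description", pv.2)] | none => item

def map_input_py_alt (rows : List (List (String × String))) : List (List (String × String)) :=
  rows.foldl (fun out r =>
    let item := pvRowItemB r
    if item.isEmpty then out else out ++ [item]) []

-- ===== PRECONDITION & SPEC =====
def Spec_map_input_py (rows : List (List (String × String))) (out : List (List (String × String))) : Prop := out = map_input_py_alt rows
instance (rows : List (List (String × String))) (out : List (List (String × String))) : Decidable (Spec_map_input_py rows out) := by unfold Spec_map_input_py; infer_instance

-- ===== CLAIM (what is proved, stated in full; the proofs are below) =====
def Claim_equal_map_input_py : Prop := ∀ (rows : List (List (String × String))), Dom_map_input_py rows → Spec_map_input_py rows (map_input_py rows)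

-- ===== LEMMAS AND PROOFS =====

-- merge of two candidate states: keep the lower rank, left-biased
def pvMerge (a b : Option (Nat × String)) : Option (Nat × String) :=
  match b with
  | none => a
  | some pv => pvUpd a pv.1 pv.2

-- A's per-field chain as a selection over a (rank, key) candidate list
def pvChain (l : List (String × String)) : List (Nat × String) → Option (Nat × String)
  | [] => none
  | (p, c) :: rest =>
    match pvGet l c with
    | some v => if v ≠ "" then some (p, v) else pvChain l rest
    | none => pvChain l rest

-- the contribution of a single row entry (k, v) to a candidate list
def pvContrib (cs : List (Nat × String)) (k v : String) : Option (Nat × String) :=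
  match cs.find? (fun pc => pc.2 == k) with
  | some pc => if v ≠ "" then some (pc.1, v) else none
  | none => none

def csArg : List (Nat × String) := [(0, "Name"), (1, "Argument"), (2, "Parameter"), (3, "Col1")]
def csTyp : List (Nat × String) := [(0, "Type"), (1, "Accepts"), (2, "Col2")]
def csDes : List (Nat × String) := [(0, "Description"), (1, "Col3")]

theorem pvGet_cons (k v : String) (t : List (String × String)) (c : String) :
    pvGet ((k, v) :: t) c = if k = c then some v else pvGet t c := by
  simp [pvGet, PySem.Dict.get?_mk_cons]

theorem pvGet_nil (c : String) : pvGet [] c = none := rfl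

theorem pvGet_none_of_not_mem (t : List (String × String)) (k : String)
    (h : k ∉ t.map Prod.fst) : pvGet t k = none := by
  induction t with
  | nil => exact pvGet_nil k
  | cons kv t ih =>
    obtain ⟨k', v'⟩ := kv
    simp only [List.map_cons, List.mem_cons, not_or] at h
    rw [pvGet_cons]
    rw [if_neg (fun hh : k' = k => h.1 hh.symm)]
    exact ih h.2

theorem merge_assoc (a b c : Option (Nat × String)) :
    pvMerge (pvMerge a b) c = pvMerge a (pvMerge b c) := by
  rcases a with _ | ⟨pa, va⟩ <;> rcases b with _ | ⟨pb, vb⟩ <;> rcases c with _ | ⟨pc, vc⟩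
  · rfl
  · simp [pvMerge, pvUpd]
  · rfl
  · simp [pvMerge, pvUpd]; split_ifs <;> simp [pvUpd] <;> omega
  · rfl
  · simp [pvMerge, pvUpd]
  · rfl
  · simp only [pvMerge, pvUpd]
    by_cases h1 : pb < pa <;> by_cases h2 : pc < pb <;> by_cases h3 : pc < pa <;>
      simp [h1, h2, h3] <;> omega

theorem merge_none_right (a : Option (Nat × String)) : pvMerge a none = a := rfl

theorem merge_none_left (b : Option (Nat × String)) : pvMerge none b = b := by
  cases b <;> simp [pvMerge, pvUpd]

theorem merge_gt (p : Nat) (w : String) (a : Option (Nat × String))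
    (h : ∀ q x, a = some (q, x) → p < q) :
    pvMerge a (some (p, w)) = some (p, w) := by
  cases a with
  | none => simp [pvMerge, pvUpd]
  | some qx =>
    obtain ⟨q, x⟩ := qx
    have := h q x rfl
    simp [pvMerge, pvUpd]
    omega

theorem chain_nil (cs : List (Nat × String)) : pvChain [] cs = none := by
  induction cs with
  | nil => rfl
  | cons pc rest ih => obtain ⟨p, c⟩ := pc; simp [pvChain, pvGet_nil, ih]

theorem chain_mem (l : List (String × String)) (cs : List (Nat × String)) (pv : Nat × String)
    (h : pvChain l cs = some pv) : ∃ c, (pv.1, c) ∈ cs := by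
  induction cs with
  | nil => simp [pvChain] at h
  | cons pc rest ih =>
    obtain ⟨p, c⟩ := pc
    simp only [pvChain] at h
    cases hg : pvGet l c with
    | none =>
      rw [hg] at h
      obtain ⟨c', hc'⟩ := ih h
      exact ⟨c', List.mem_cons_of_mem _ hc'⟩
    | some v =>
      rw [hg] at h
      by_cases hv : v = ""
      · simp [hv] at h
        obtain ⟨c', hc'⟩ := ih h
        exact ⟨c', List.mem_cons_of_mem _ hc'⟩
      · simp [hv] at h
        exact ⟨c, by simp [← h]⟩

theorem contrib_mem (cs : List (Nat × String)) (k v : String) (pv : Nat × String)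
    (h : pvContrib cs k v = some pv) : ∃ c, (pv.1, c) ∈ cs := by
  unfold pvContrib at h
  cases hf : cs.find? (fun pc => pc.2 == k) with
  | none => rw [hf] at h; simp at h
  | some pc =>
    rw [hf] at h
    by_cases hv : v = ""
    · simp [hv] at h
    · simp [hv] at h
      refine ⟨pc.2, ?_⟩
      rw [← h]
      simpa using List.mem_of_find?_eq_some hf

theorem merge_lt (p : Nat) (v : String) (b : Option (Nat × String))
    (h : ∀ q w, b = some (q, w) → p < q) :
    pvMerge (some (p, v)) b = some (p, v) := by
  cases b with
  | none => rfl
  | some qw =>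
    obtain ⟨q, w⟩ := qw
    have := h q w rfl
    simp [pvMerge, pvUpd]
    omega

theorem chain_skip (k v : String) (t : List (String × String)) (cs : List (Nat × String))
    (h : ∀ pc ∈ cs, pc.2 ≠ k) : pvChain ((k, v) :: t) cs = pvChain t cs := by
  induction cs with
  | nil => rfl
  | cons pc rest ih =>
    obtain ⟨p, c⟩ := pc
    have hck : c ≠ k := h (p, c) (by simp)
    simp only [pvChain, pvGet_cons, if_neg (fun hh : k = c => hck hh.symm)]
    cases pvGet t c with
    | none => exact ih (fun x hx => h x (List.mem_cons_of_mem _ hx))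
    | some w =>
      by_cases hw : w = ""
      · simp [hw]; exact ih (fun x hx => h x (List.mem_cons_of_mem _ hx))
      · simp [hw]

-- key lemma: one row entry peels off as a merge against the chain of the tail
theorem chain_cons (k v : String) (t : List (String × String)) (cs : List (Nat × String))
    (hlt : cs.Pairwise (fun a b => a.1 < b.1)) (hnd : (cs.map Prod.snd).Nodup)
    (hk : pvGet t k = none) :
    pvChain ((k, v) :: t) cs = pvMerge (pvContrib cs k v) (pvChain t cs) := by
  induction cs with
  | nil => simp [pvChain, pvContrib, pvMerge]
  | cons pc rest ih =>
    obtain ⟨p, c⟩ := pc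
    rw [List.pairwise_cons] at hlt
    simp only [List.map_cons, List.nodup_cons] at hnd
    by_cases hck : c = k
    · subst hck
      simp only [pvChain, pvGet_cons, if_pos rfl, hk]
      by_cases hv : v = ""
      · subst hv
        simp only [ne_eq, not_true_eq_false, if_false]
        have hcontrib : pvContrib ((p, c) :: rest) c "" = none := by
          simp [pvContrib]
        rw [hcontrib]
        have : pvChain ((c, "") :: t) rest = pvChain t rest := by
          apply chain_skip
          intro x hx hxc
          exact hnd.1 (by rw [← hxc]; exact List.mem_map_of_mem hx)
        rw [this]
        simp [merge_none_left]
      · simp only [ne_eq, hv, not_false_eq_true, if_true]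
        have hcontrib : pvContrib ((p, c) :: rest) c v = some (p, v) := by
          simp [pvContrib, List.find?, hv]
        rw [hcontrib]
        symm
        apply merge_lt
        intro q w hqw
        obtain ⟨c', hc'⟩ := chain_mem t rest (q, w) hqw
        exact hlt.1 (q, c') hc'
    · have hgc : pvGet ((k, v) :: t) c = pvGet t c := by
        rw [pvGet_cons, if_neg (fun hh : k = c => hck hh.symm)]
      have hcontrib : pvContrib ((p, c) :: rest) k v = pvContrib rest k v := by
        simp [pvContrib, List.find?, show (c == k) = false by simp [hck]]
      simp only [pvChain, hgc, hcontrib]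
      cases hg : pvGet t c with
      | none => exact ih hlt.2 hnd.2
      | some w =>
        by_cases hw : w = ""
        · simp only [hw, ne_eq, not_true_eq_false, if_false]
          exact ih hlt.2 hnd.2
        · simp only [ne_eq, hw, not_false_eq_true, if_true]
          symm
          apply merge_gt
          intro q x hqx
          obtain ⟨c', hc'⟩ := contrib_mem rest k v (q, x) hqx
          exact hlt.1 (q, c') hc' 

-- step as three independent merges
theorem step_eq (b : Option (Nat × String) × Option (Nat × String) × Option (Nat × String))
    (k v : String) :
    pvStep b (k, v) = (pvMerge b.1 (pvContrib csArg k v),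
                       pvMerge b.2.1 (pvContrib csTyp k v),
                       pvMerge b.2.2 (pvContrib csDes k v)) := by
  by_cases hv : v = ""
  · subst hv
    simp only [pvStep, ne_eq, not_true_eq_false, if_false]
    have cArg : pvContrib csArg k "" = none := by
      unfold pvContrib; cases csArg.find? (fun pc => pc.2 == k) <;> simp
    have cTyp : pvContrib csTyp k "" = none := by
      unfold pvContrib; cases csTyp.find? (fun pc => pc.2 == k) <;> simp
    have cDes : pvContrib csDes k "" = none := by
      unfold pvContrib; cases csDes.find? (fun pc => pc.2 == k) <;> simp
    rw [cArg, cTyp, cDes]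
    cases hp : pvPrio k <;> simp [merge_none_right]
  · by_cases h1 : k = "Name"
    · subst h1; simp [pvStep, pvPrio, pvContrib, csArg, csTyp, csDes, pvMerge,
        PySem.Dict.get?_mk_cons, List.find?, hv, merge_none_right]
    · by_cases h2 : k = "Argument"
      · subst h2; simp [pvStep, pvPrio, pvContrib, csArg, csTyp, csDes, pvMerge,
          PySem.Dict.get?_mk_cons, List.find?, hv, merge_none_right]
      · by_cases h3 : k = "Parameter"
        · subst h3; simp [pvStep, pvPrio, pvContrib, csArg, csTyp, csDes, pvMerge,
            PySem.Dict.get?_mk_cons, List.find?, hv, merge_none_right]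
        · by_cases h4 : k = "Col1"
          · subst h4; simp [pvStep, pvPrio, pvContrib, csArg, csTyp, csDes, pvMerge,
              PySem.Dict.get?_mk_cons, List.find?, hv, merge_none_right]
          · by_cases h5 : k = "Type"
            · subst h5; simp [pvStep, pvPrio, pvContrib, csArg, csTyp, csDes, pvMerge,
                PySem.Dict.get?_mk_cons, List.find?, hv, merge_none_right]
            · by_cases h6 : k = "Accepts"
              · subst h6; simp [pvStep, pvPrio, pvContrib, csArg, csTyp, csDes, pvMerge,
                  PySem.Dict.get?_mk_cons, List.find?, hv, merge_none_right]
              · by_cases h7 : k = "Col2"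
                · subst h7; simp [pvStep, pvPrio, pvContrib, csArg, csTyp, csDes, pvMerge,
                    PySem.Dict.get?_mk_cons, List.find?, hv, merge_none_right]
                · by_cases h8 : k = "Description"
                  · subst h8; simp [pvStep, pvPrio, pvContrib, csArg, csTyp, csDes, pvMerge,
                      PySem.Dict.get?_mk_cons, List.find?, hv, merge_none_right]
                  · by_cases h9 : k = "Col3"
                    · subst h9; simp [pvStep, pvPrio, pvContrib, csArg, csTyp, csDes, pvMerge,
                        PySem.Dict.get?_mk_cons, List.find?, hv, merge_none_right]
                    · have g1 : ¬("Name" = k) := fun h => h1 h.symm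
                      have g2 : ¬("Argument" = k) := fun h => h2 h.symm
                      have g3 : ¬("Parameter" = k) := fun h => h3 h.symm
                      have g4 : ¬("Col1" = k) := fun h => h4 h.symm
                      have g5 : ¬("Type" = k) := fun h => h5 h.symm
                      have g6 : ¬("Accepts" = k) := fun h => h6 h.symm
                      have g7 : ¬("Col2" = k) := fun h => h7 h.symm
                      have g8 : ¬("Description" = k) := fun h => h8 h.symm
                      have g9 : ¬("Col3" = k) := fun h => h9 h.symm
                      simp [pvStep, pvPrio, pvContrib, csArg, csTyp, csDes, pvMerge,
                        PySem.Dict.get?_mk_cons, List.find?, hv, merge_none_right,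
                        h1, h2, h3, h4, h5, h6, h7, h8, h9, g1, g2, g3, g4, g5, g6, g7, g8, g9,
                        show ({ items := [] } : PySem.Dict String (Nat × Nat)).get? k = none from rfl,
                        show ("Name" == k) = false by simp [g1],
                        show ("Argument" == k) = false by simp [g2],
                        show ("Parameter" == k) = false by simp [g3],
                        show ("Col1" == k) = false by simp [g4],
                        show ("Type" == k) = false by simp [g5],
                        show ("Accepts" == k) = false by simp [g6],
                        show ("Col2" == k) = false by simp [g7],
                        show ("Description" == k) = false by simp [g8],
                        show ("Col3" == k) = false by simp [g9]]

theorem items_key_not_seen (r : List (String × String)) (seen : List String) (k v : String)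
    (h : (k, v) ∈ pvItemsFM r seen) : k ∉ seen := by
  induction r generalizing seen with
  | nil => simp [pvItemsFM] at h
  | cons kv t ih =>
    obtain ⟨k', v'⟩ := kv
    simp only [pvItemsFM] at h
    by_cases hs : k' ∈ seen
    · rw [if_pos hs] at h; exact ih seen h
    · rw [if_neg hs] at h
      rcases List.mem_cons.mp h with heq | hmem
      · rw [Prod.mk.injEq] at heq
        intro hk; exact hs (heq.1 ▸ hk)
      · intro hk
        exact (ih (k' :: seen) hmem) (List.mem_cons_of_mem _ hk)

theorem items_nodup_keys (r : List (String × String)) (seen : List String) :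
    ((pvItemsFM r seen).map Prod.fst).Nodup := by
  induction r generalizing seen with
  | nil => simp [pvItemsFM]
  | cons kv t ih =>
    obtain ⟨k, v⟩ := kv
    simp only [pvItemsFM]
    split_ifs with hs
    · exact ih seen
    · simp only [List.map_cons, List.nodup_cons]
      refine ⟨?_, ih (k :: seen)⟩
      intro hmem
      obtain ⟨⟨k', v'⟩, hmem', hk⟩ := List.mem_map.mp hmem
      have := items_key_not_seen t (k :: seen) k' v' hmem'
      exact this (by simp only [List.mem_cons]; exact Or.inl hk)

theorem items_get (r : List (String × String)) (seen : List String) (c : String)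
    (hc : c ∉ seen) : pvGet (pvItemsFM r seen) c = pvGet r c := by
  induction r generalizing seen with
  | nil => simp [pvItemsFM]
  | cons kv t ih =>
    obtain ⟨k, v⟩ := kv
    simp only [pvItemsFM]
    by_cases hs : k ∈ seen
    · rw [if_pos hs, pvGet_cons, if_neg (fun hh : k = c => hc (hh ▸ hs)), ih seen hc]
    · rw [if_neg hs, pvGet_cons, pvGet_cons]
      by_cases hkc : k = c
      · simp [hkc]
      · rw [if_neg hkc, if_neg hkc]
        refine ih (k :: seen) ?_
        intro hm
        rcases List.mem_cons.mp hm with h1 | h2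
        · exact hkc h1.symm
        · exact hc h2

-- the scan over a nodup-keyed entry list computes the three chains
theorem scan_eq (l : List (String × String)) (hnd : (l.map Prod.fst).Nodup)
    (b : Option (Nat × String) × Option (Nat × String) × Option (Nat × String)) :
    l.foldl pvStep b = (pvMerge b.1 (pvChain l csArg),
                        pvMerge b.2.1 (pvChain l csTyp),
                        pvMerge b.2.2 (pvChain l csDes)) := by
  induction l generalizing b with
  | nil => simp [chain_nil, merge_none_right]
  | cons kv t ih =>
    obtain ⟨k, v⟩ := kv
    simp only [List.map_cons, List.nodup_cons] at hnd
    have hk : pvGet t k = none := pvGet_none_of_not_mem t k hnd.1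
    simp only [List.foldl_cons]
    rw [step_eq, ih hnd.2]
    have hA := chain_cons k v t csArg (by decide) (by decide) hk
    have hT := chain_cons k v t csTyp (by decide) (by decide) hk
    have hD := chain_cons k v t csDes (by decide) (by decide) hk
    rw [hA, hT, hD]
    simp [merge_assoc]

-- per-field bridges: B's best-candidate fragment equals A's guarded append fragment
theorem frag_arg (r : List (String × String)) :
    (match pvChain r csArg with
      | some pv => [(("Argument" : String), pv.2)]
      | none => ([] : List (String × String))) =
    (if pvTruthy (pvOr (pvOr (pvOr (pvGet r "Name") (pvGet r "Argument")) (pvGet r "Parameter")) (pvGet r "Col1"))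
      then [("Argument", (pvOr (pvOr (pvOr (pvGet r "Name") (pvGet r "Argument")) (pvGet r "Parameter")) (pvGet r "Col1")).getD "")]
      else []) := by
  simp only [csArg, pvChain]
  cases h1 : pvGet r "Name" <;> cases h2 : pvGet r "Argument" <;>
    cases h3 : pvGet r "Parameter" <;> cases h4 : pvGet r "Col1" <;>
    simp [pvOr, pvTruthy] <;> split_ifs <;> simp_all

theorem frag_typ (r : List (String × String)) :
    (match pvChain r csTyp with
      | some pv => [(("Type" : String), pv.2)]
      | none => ([] : List (String × String))) =
    (if pvTruthy (pvOr (pvOr (pvGet r "Type") (pvGet r "Accepts")) (pvGet r "Col2"))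
      then [("Type", (pvOr (pvOr (pvGet r "Type") (pvGet r "Accepts")) (pvGet r "Col2")).getD "")]
      else []) := by
  simp only [csTyp, pvChain]
  cases h1 : pvGet r "Type" <;> cases h2 : pvGet r "Accepts" <;> cases h3 : pvGet r "Col2" <;>
    simp [pvOr, pvTruthy] <;> split_ifs <;> simp_all

theorem frag_des (r : List (String × String)) :
    (match pvChain r csDes with
      | some pv => [(("Description" : String), pv.2)]
      | none => ([] : List (String × String))) =
    (if pvTruthy (pvOr (pvGet r "Description") (pvGet r "Col3"))
      then [("Description", (pvOr (pvGet r "Description") (pvGet r "Col3")).getD "")]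
      else []) := by
  simp only [csDes, pvChain]
  cases h1 : pvGet r "Description" <;> cases h2 : pvGet r "Col3" <;>
    simp [pvOr, pvTruthy] <;> split_ifs <;> simp_all

theorem chain_items (r : List (String × String)) (cs : List (Nat × String)) :
    pvChain (pvItemsFM r []) cs = pvChain r cs := by
  induction cs with
  | nil => rfl
  | cons pc rest ih =>
    obtain ⟨p, c⟩ := pc
    simp only [pvChain, items_get r [] c (by simp), ih]

-- per-row equality
theorem rowItem_eq (r : List (String × String)) :
    pvRowItemB r =
      (let argument := pvOr (pvOr (pvOr (pvGet r "Name") (pvGet r "Argument")) (pvGet r "Parameter")) (pvGet r "Col1")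
       let ptype := pvOr (pvOr (pvGet r "Type") (pvGet r "Accepts")) (pvGet r "Col2")
       let description := pvOr (pvGet r "Description") (pvGet r "Col3")
       let item : List (String × String) := []
       let item := if pvTruthy argument then item ++ [("Argument", argument.getD "")] else item
       let item := if pvTruthy ptype then item ++ [("Type", ptype.getD "")] else item
       if pvTruthy description then item ++ [("Description", description.getD "")] else item) := by
  have append_match : ∀ (o : Option (Nat × String)) (s : String) (item : List (String × String)),
      (match o with | some pv => item ++ [(s, pv.2)] | none => item) =
      item ++ (match o with | some pv => [(s, pv.2)] | none => []) := by
    intro o s item; cases o <;> simp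
  have append_if : ∀ (c : Bool) (e : String × String) (item : List (String × String)),
      (if c then item ++ [e] else item) = item ++ (if c then [e] else []) := by
    intro c e item; cases c <;> simp
  unfold pvRowItemB
  rw [scan_eq (pvItemsFM r []) (items_nodup_keys r []) (none, none, none)]
  simp only [merge_none_left, chain_items]
  rw [append_match, append_match, append_match, append_if, append_if, append_if,
    frag_arg, frag_typ, frag_des]

theorem fold_eq (rows : List (List (String × String))) (acc : List (List (String × String))) :
    rows.foldl (fun out r =>
      let argument := pvOr (pvOr (pvOr (pvGet r "Name") (pvGet r "Argument")) (pvGet r "Parameter")) (pvGet r "Col1")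
      let ptype := pvOr (pvOr (pvGet r "Type") (pvGet r "Accepts")) (pvGet r "Col2")
      let description := pvOr (pvGet r "Description") (pvGet r "Col3")
      let item : List (String × String) := []
      let item := if pvTruthy argument then item ++ [("Argument", argument.getD "")] else item
      let item := if pvTruthy ptype then item ++ [("Type", ptype.getD "")] else item
      let item := if pvTruthy description then item ++ [("Description", description.getD "")] else item
      if item ≠ [] then out ++ [item] else out) acc =
    rows.foldl (fun out r =>
      let item := pvRowItemB r
      if item.isEmpty then out else out ++ [item]) acc := by
  induction rows generalizing acc with
  | nil => rfl
  | cons r rs ih =>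
    simp only [List.foldl]
    rw [ih]
    congr 1
    rw [rowItem_eq r]
    simp only [List.isEmpty_iff, ne_eq]
    split_ifs <;> simp_all

-- ===== VERDICT (by name: the statement is the Claim_ definition above) =====
theorem map_input_py_spec : Claim_equal_map_input_py := by
  intro rows _
  unfold Spec_map_input_py map_input_py map_input_py_alt
  exact fold_eq rows []
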